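-- pv_equiv track=rewrite | github.com/soraxas/AbaqusCRCPModelling | 3D-CRCP-embedded-sbar/rpt_to_csv.py | readTitle
-- ===== SOURCE A (Python) =====
-- def readTitle(contents):
--     titles = []
--     # spliy by white space
--     for c in contents:
--         titles.append(c.strip().split())
--     maxLength = len(titles[-1])
--     # pad the titles as some are splitted
--     for i in range(len(titles)):
--         while len(titles[i]) < maxLength:
--             titles[i].insert(0, '')
--     # join the splitted title together
--     finalTitle = []
--     for i in range(maxLength):
--         column = ''
--         for t in titles:
--             column += t[i]
--         finalTitle.append(column)
--     return finalTitle
-- ===== SOURCE B (Python) =====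
-- def readTitle(contents):
--     rows = [c.strip().split() for c in contents]
--     maxLength = len(rows[-1])
--     cols = [[] for _ in range(maxLength)]
--     for r in rows:
--         offset = max(0, maxLength - len(r))
--         for j, tok in enumerate(r):
--             if offset + j < maxLength:
--                 cols[offset + j].append(tok)
--     return [''.join(parts) for parts in cols]
-- ===== Notes on version B (the rewrite author's own statement) =====
-- stated objective: alternative
-- what changed: Replaces A's pad-each-row-with-repeated-insert(0,'')-then-column-major-gather by a single row-major scatter: one pass over the rows appends each token to a preallocated per-column token list (offset = max(0, maxLength - len(row))), joined once at the end.
import Mathlib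
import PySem

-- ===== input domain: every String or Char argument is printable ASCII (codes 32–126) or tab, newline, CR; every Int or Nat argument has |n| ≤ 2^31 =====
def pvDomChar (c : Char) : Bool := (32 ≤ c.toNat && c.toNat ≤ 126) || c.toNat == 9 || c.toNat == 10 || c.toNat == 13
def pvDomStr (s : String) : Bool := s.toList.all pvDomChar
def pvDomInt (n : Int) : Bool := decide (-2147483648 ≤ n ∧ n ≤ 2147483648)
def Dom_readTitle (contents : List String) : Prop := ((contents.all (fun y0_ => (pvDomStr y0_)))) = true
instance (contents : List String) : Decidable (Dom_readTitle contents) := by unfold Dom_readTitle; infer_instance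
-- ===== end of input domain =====

-- B replaces A's pad-then-column-major gather by a single row-major scatter into a
-- preallocated output list; same return value on every non-empty input (alternative decomposition).


-- ===== PORT A =====
-- while len(titles[i]) < maxLength: titles[i].insert(0, '')   (insert at 0 = prepend)
def padLoop (m : Nat) (t : List String) : List String :=
  if t.length < m then padLoop m ("" :: t) else t
termination_by m - t.length
decreasing_by simp only [List.length_cons]; omega

def readTitle (contents : List String) : List String :=
  -- for c in contents: titles.append(c.strip().split())
  let titles := contents.foldl (fun acc c => acc ++ [PySem.Str.split₀ (PySem.Str.strip c)]) []
  -- maxLength = len(titles[-1]); pyGet? none = IndexError, excluded by Pre_readTitle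
  let maxLength := ((PySem.List.pyGet? titles (-1)).getD []).length
  -- for i in range(len(titles)): pad in place
  let titles := titles.map (padLoop maxLength)
  -- for i in range(maxLength): column = ''; for t in titles: column += t[i]   (t[i] always in range after padding)
  (List.range maxLength).foldl
    (fun ft i => ft ++ [titles.foldl (fun col t => col ++ t.getD i "") ""]) []

-- ===== PORT B =====
-- inner loop body of the scatter: cols[offset + j].append(tok) when in range
-- (offset + j is always ≥ 0, so .toNat is exact)
def pvUpdL (m len : Nat) (cols : List (List String)) (jt : Int × String) : List (List String) :=
  let offset : Int := max 0 ((m : Int) - (len : Int))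
  let k := offset + jt.1
  if k < (m : Int) then cols.set k.toNat (cols.getD k.toNat [] ++ [jt.2]) else cols

def readTitle_alt (contents : List String) : List String :=
  let rows := contents.map (fun c => PySem.Str.split₀ (PySem.Str.strip c))
  -- maxLength = len(rows[-1]); pyGet? none = IndexError, excluded by Pre_readTitle
  let maxLength := ((PySem.List.pyGet? rows (-1)).getD []).length
  let cols := rows.foldl
    (fun cols r => (PySem.List.enumerate r 0).foldl (pvUpdL maxLength r.length) cols)
    (List.replicate maxLength [])
  cols.map (fun parts => PySem.Str.join "" parts)

-- ===== PRECONDITION & SPEC =====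
-- Pre_ excludes the empty list, on which A raises IndexError at titles[-1] (B raises there too).
def Pre_readTitle (contents : List String) : Prop := contents ≠ []
instance (contents : List String) : Decidable (Pre_readTitle contents) := by unfold Pre_readTitle; infer_instance
def pvWitness_readTitle : List String := ["  Frame  S.S11", "Loc 1"]

def Spec_readTitle (contents : List String) (out : List String) : Prop := out = readTitle_alt contents
instance (contents : List String) (out : List String) : Decidable (Spec_readTitle contents out) := by unfold Spec_readTitle; infer_instance

-- ===== CLAIM (what is proved, stated in full; the proofs are below) =====
def Claim_equal_readTitle : Prop := ∀ (contents : List String), Dom_readTitle contents → Pre_readTitle contents → Spec_readTitle contents (readTitle contents)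

-- ===== LEMMAS AND PROOFS =====

-- proof-side string version of the scatter update (B's buffer mapped through ''.join)
def pvUpd (m len : Nat) (ft : List String) (jt : Int × String) : List String :=
  let offset : Int := max 0 ((m : Int) - (len : Int))
  let k := offset + jt.1
  if k < (m : Int) then ft.set k.toNat (ft.getD k.toNat "" ++ jt.2) else ft

theorem pvFlat_inter (l : List (List Char)) : (List.intersperse [] l).flatten = l.flatten := by
  induction l with
  | nil => simp
  | cons x xs ih =>
    cases xs with
    | nil => simp
    | cons y zs => simp [List.intersperse] at *; simpa using ih

theorem pvJoin_nil : PySem.Str.join "" [] = "" := by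
  apply String.toList_injective
  simp [PySem.Str.toList_join, PySem.Chars.join, List.intercalate]

theorem pvJoin_snoc (x : List String) (t : String) :
    PySem.Str.join "" (x ++ [t]) = PySem.Str.join "" x ++ t := by
  apply String.toList_injective
  simp [PySem.Str.toList_join, PySem.Chars.join, List.intercalate, pvFlat_inter]

theorem pvFoldl_map_comm {α β γ : Type} (j : β → γ) (g : β → α → β) (g' : γ → α → γ)
    (hc : ∀ b x, j (g b x) = g' (j b) x) :
    ∀ (l : List α) (b : β), j (l.foldl g b) = l.foldl g' (j b) := by
  intro l
  induction l with
  | nil => intro b; simp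
  | cons x xs ih => intro b; rw [List.foldl_cons, List.foldl_cons, ih, hc]

theorem pvUpdL_map (m len : Nat) (cols : List (List String)) (jt : Int × String) :
    (pvUpdL m len cols jt).map (fun p => PySem.Str.join "" p)
      = pvUpd m len (cols.map (fun p => PySem.Str.join "" p)) jt := by
  by_cases hc : max 0 ((m : Int) - (len : Int)) + jt.1 < (m : Int)
  · simp [pvUpdL, pvUpd, if_pos hc, List.map_set, pvJoin_snoc]
    generalize cols[(max 0 ((m : Int) - (len : Int)) + jt.1).toNat]? = o
    cases o <;> simp [pvJoin_nil]
  · simp [pvUpdL, pvUpd, if_neg hc]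

-- B's list-of-tokens scatter, joined at the end, is the string scatter
theorem pvB_to_str (m : Nat) (rows : List (List String)) :
    (rows.foldl
        (fun cols r => (PySem.List.enumerate r 0).foldl (pvUpdL m r.length) cols)
        (List.replicate m ([] : List String))).map (fun parts => PySem.Str.join "" parts)
      = rows.foldl
        (fun ft r => (PySem.List.enumerate r 0).foldl (pvUpd m r.length) ft)
        (List.replicate m "") := by
  rw [pvFoldl_map_comm (fun (b : List (List String)) => b.map (fun parts => PySem.Str.join "" parts))
      (fun cols r => (PySem.List.enumerate r 0).foldl (pvUpdL m r.length) cols)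
      (fun ft r => (PySem.List.enumerate r 0).foldl (pvUpd m r.length) ft)
      (fun b r => pvFoldl_map_comm _ _ _
        (fun b jt => pvUpdL_map m r.length b jt) (PySem.List.enumerate r 0) b)]
  rw [List.map_replicate, pvJoin_nil]

-- generic: building a list by appending singletons is map
theorem pvFoldl_build {α β : Type} (f : α → β) (l : List α) (acc : List β) :
    l.foldl (fun a x => a ++ [f x]) acc = acc ++ l.map f := by
  induction l generalizing acc with
  | nil => simp
  | cons x xs ih => simp [List.foldl_cons, ih]

-- column string of a list of rows (padded view), foldr style
def pvPad (m : Nat) (r : List String) : List String := List.replicate (m - r.length) "" ++ r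

def pvCols (m : Nat) (rows : List (List String)) (i : Nat) : String :=
  match rows with
  | [] => ""
  | r :: rs => (pvPad m r).getD i "" ++ pvCols m rs i

theorem pvFoldl_cols (m i : Nat) (rows : List (List String)) (acc : String) :
    rows.foldl (fun c r => c ++ (pvPad m r).getD i "") acc = acc ++ pvCols m rows i := by
  induction rows generalizing acc with
  | nil => simp [pvCols]
  | cons r rs ih =>
    rw [List.foldl_cons, ih]
    simp [pvCols, String.append_assoc]

theorem padLoop_eq (m : Nat) (t : List String) : padLoop m t = pvPad m t := by
  unfold pvPad
  generalize hk : m - t.length = k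
  induction k generalizing t with
  | zero => rw [padLoop]; simp [show ¬ t.length < m by omega]
  | succ k ih =>
    have hlt : t.length < m := by omega
    rw [padLoop, if_pos hlt, ih ("" :: t) (by simp; omega)]
    simp [List.replicate_succ']

-- contribution of a token list scattered from base index b
def pvCtb (b : Nat) (toks : List String) (i : Nat) : String :=
  if b ≤ i then toks.getD (i - b) "" else ""

-- Nat-side scatter of one row
def pvScat (m o s : Nat) (ft : List String) (toks : List String) : List String :=
  match toks with
  | [] => ft
  | t :: ts => pvScat m o (s+1) (if o + s < m then ft.set (o+s) (ft.getD (o+s) "" ++ t) else ft) ts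

theorem pvUpd_eval (m len s : Nat) (ft : List String) (t : String) :
    pvUpd m len ft ((s : Int), t)
      = if (m - len) + s < m then ft.set ((m-len)+s) (ft.getD ((m-len)+s) "" ++ t) else ft := by
  simp only [pvUpd]
  have hmax : max 0 ((m : Int) - (len : Int)) = ((m - len : Nat) : Int) := by omega
  rw [hmax]
  by_cases h : (m - len) + s < m
  · rw [if_pos (by omega), if_pos h,
      show (((m - len : Nat) : Int) + (s : Int)).toNat = (m - len) + s by omega]
  · rw [if_neg (by omega), if_neg h]

-- the Int fold over enumerate in readTitle_alt is the Nat scatter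
theorem pvScat_int (m len : Nat) (toks : List String) :
    ∀ (s : Nat) (ft : List String),
    (PySem.List.enumerate toks (s : Int)).foldl (pvUpd m len) ft
      = pvScat m (m - len) s ft toks := by
  induction toks with
  | nil => intro s ft; simp [pvScat, PySem.List.enumerate_nil]
  | cons t ts ih =>
    intro s ft
    rw [PySem.List.enumerate_cons, List.foldl_cons]
    have hstep := ih (s+1) (pvUpd m len ft ((s : Int), t))
    push_cast at hstep
    rw [hstep, pvUpd_eval]
    conv_rhs => rw [pvScat]

theorem pvRange_map_getD (m : Nat) (ft : List String) (h : ft.length = m) :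
    (List.range m).map (fun i => ft.getD i "") = ft := by
  apply List.ext_getElem (by simp [h])
  intro i h1 h2
  simp only [List.getElem_map, List.getElem_range]
  rw [List.getD_eq_getElem]

theorem pvGetD_map_range (g : Nat → String) (m i : Nat) (h : i < m) :
    ((List.range m).map g).getD i "" = g i := by
  rw [List.getD_eq_getElem] <;> simp [h]

theorem pvScat_spec (m o : Nat) (toks : List String) :
    ∀ (s : Nat) (ft : List String), ft.length = m →
    pvScat m o s ft toks = (List.range m).map (fun i => ft.getD i "" ++ pvCtb (o + s) toks i) := by
  induction toks with
  | nil =>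
    intro s ft h
    have : (List.range m).map (fun i => ft.getD i "" ++ pvCtb (o + s) [] i)
        = (List.range m).map (fun i => ft.getD i "") := by
      apply List.map_congr_left; intro i _; simp [pvCtb]
    rw [pvScat, this, pvRange_map_getD m ft h]
  | cons t ts ih =>
    intro s ft h
    rw [pvScat]
    by_cases hos : o + s < m
    · rw [if_pos hos, ih (s+1) _ (by simp [h])]
      apply List.map_congr_left
      intro i hi
      have him : i < m := List.mem_range.mp hi
      by_cases hie : i = o + s
      · subst hie
        rw [show (ft.set (o+s) (ft.getD (o+s) "" ++ t)).getD (o+s) ""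
              = ft.getD (o+s) "" ++ t by
            simp [List.getD_eq_getElem?_getD, h, hos]]
        simp [pvCtb, show ¬ (o + (s+1) ≤ o + s) by omega]
      · rw [show (ft.set (o+s) (ft.getD (o+s) "" ++ t)).getD i ""
              = ft.getD i "" by
            simp [List.getD_eq_getElem?_getD, List.getElem?_set_ne (by omega : o+s ≠ i)]]
        unfold pvCtb
        by_cases hle : o + s ≤ i
        · have hlt : o + s + 1 ≤ i := by omega
          rw [if_pos (by omega : o + (s+1) ≤ i), if_pos hle,
            show i - (o + s) = (i - (o + (s+1))) + 1 by omega]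
          simp
        · rw [if_neg (by omega), if_neg hle]
    · rw [if_neg hos, ih (s+1) ft h]
      apply List.map_congr_left
      intro i hi
      have him : i < m := List.mem_range.mp hi
      simp [pvCtb, show ¬ (o + (s+1) ≤ i) by omega, show ¬ (o + s ≤ i) by omega]

theorem pvCtb_pad (m : Nat) (r : List String) (i : Nat) (_hi : i < m) :
    pvCtb (m - r.length) r i = (pvPad m r).getD i "" := by
  unfold pvCtb pvPad
  by_cases h : m - r.length ≤ i
  · rw [if_pos h]
    conv_rhs => rw [List.getD_eq_getElem?_getD, List.getElem?_append_right (by simp; omega)]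
    simp [List.getD_eq_getElem?_getD]
  · rw [if_neg h]
    conv_rhs => rw [List.getD_eq_getElem?_getD, List.getElem?_append_left (by simp; omega)]
    simp [show i < m - r.length by omega]

-- one row scattered into a length-m buffer
theorem pvStep_spec (m : Nat) (ft : List String) (r : List String) (h : ft.length = m) :
    (PySem.List.enumerate r 0).foldl (pvUpd m r.length) ft
      = (List.range m).map (fun i => ft.getD i "" ++ (pvPad m r).getD i "") := by
  rw [show (0 : Int) = ((0 : Nat) : Int) by simp, pvScat_int m r.length r 0 ft,
    pvScat_spec m (m - r.length) r 0 ft h]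
  apply List.map_congr_left
  intro i hi
  rw [show m - r.length + 0 = m - r.length by omega, pvCtb_pad m r i (List.mem_range.mp hi)]

theorem pvFold_spec (m : Nat) (rows : List (List String)) :
    ∀ (ft : List String), ft.length = m →
    rows.foldl
      (fun ft r => (PySem.List.enumerate r 0).foldl (pvUpd m r.length) ft) ft
      = (List.range m).map (fun i => ft.getD i "" ++ pvCols m rows i) := by
  induction rows with
  | nil =>
    intro ft h
    have : (List.range m).map (fun i => ft.getD i "" ++ pvCols m [] i)
        = (List.range m).map (fun i => ft.getD i "") := by
      apply List.map_congr_left; intro i _; simp [pvCols]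
    simp only [List.foldl_nil, this, pvRange_map_getD m ft h]
  | cons r rs ih =>
    intro ft h
    rw [List.foldl_cons, pvStep_spec m ft r h, ih _ (by simp)]
    apply List.map_congr_left
    intro i hmem
    have him : i < m := List.mem_range.mp hmem
    rw [pvGetD_map_range _ m i him]
    simp [pvCols, String.append_assoc]

-- ===== VERDICT (by name: the statement is the Claim_ definition above) =====
theorem readTitle_spec : Claim_equal_readTitle := by
  intro contents _ _
  unfold Spec_readTitle readTitle readTitle_alt
  simp only [pvFoldl_build, List.nil_append]
  set rs := contents.map (fun c => PySem.Str.split₀ (PySem.Str.strip c)) with hrs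
  rw [pvB_to_str, pvFold_spec _ _ (List.replicate _ "") (by simp)]
  apply List.map_congr_left
  intro i hi
  have him := List.mem_range.mp hi
  rw [List.foldl_map]
  simp only [padLoop_eq]
  rw [pvFoldl_cols, String.empty_append]
  simp [List.getD_eq_getElem?_getD, him]
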